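-- pv_equiv track=rewrite | github.com/maxpoletto/advent-of-code | 2015/day14.py | part2
-- ===== SOURCE A (Python) =====
-- def winner(deer, t):
--     max_dist, max_deer = 0, ""
--     for d in deer:
--         n = int(t/(d[2]+d[3]))
--         s = n*(d[2]+d[3])
--         e = min(t-s, d[2])
--         dist = (n*d[2]+e)*d[1]
--         if dist > max_dist:
--             max_dist = dist
--             max_deer = d[0]
--     return (max_deer, max_dist)
--
-- def part2(deer):
--     score = {}
--     for d in deer:
--         score[d[0]] = 0
--     for t in range(1, 2504):
--         score[winner(deer, t)[0]] += 1
--     max_score = 0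
--     for d in score:
--         max_score = max(max_score, score[d])
--     return max_score
-- ===== SOURCE B (Python) =====
-- def part2(deer):
--     # Per-second simulation: incremental distances instead of the closed-form recompute per second.
--     dist = [0] * len(deer)
--     score = {d[0]: 0 for d in deer}
--     for t in range(1, 2504):
--         for i, d in enumerate(deer):
--             if (t - 1) % (d[2] + d[3]) < d[2]:
--                 dist[i] += d[1]
--         leader, best = "", 0
--         for i, d in enumerate(deer):
--             if dist[i] > best:
--                 best = dist[i]
--                 leader = d[0]
--         score[leader] += 1
--     return max(score.values())
-- ===== Notes on version B (the rewrite author's own statement) =====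
-- stated objective: faster
-- what changed: B simulates second by second, incrementally adding each reindeer's speed while it is flying and tracking the running leader, instead of A's re-evaluation of the closed-form distance (with a float division and int() truncation) for every reindeer at every second; same O(2503*n) shape but a measurably large constant-factor win.
-- outside the precondition, e.g. on part2([('a', 1, 3, -2), ('b', 2, 1, 1)]): A returns 2503, B returns 1252; on part2([('a', 0, 1, 1)]): A raises KeyError, B raises KeyError
import Mathlib
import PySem

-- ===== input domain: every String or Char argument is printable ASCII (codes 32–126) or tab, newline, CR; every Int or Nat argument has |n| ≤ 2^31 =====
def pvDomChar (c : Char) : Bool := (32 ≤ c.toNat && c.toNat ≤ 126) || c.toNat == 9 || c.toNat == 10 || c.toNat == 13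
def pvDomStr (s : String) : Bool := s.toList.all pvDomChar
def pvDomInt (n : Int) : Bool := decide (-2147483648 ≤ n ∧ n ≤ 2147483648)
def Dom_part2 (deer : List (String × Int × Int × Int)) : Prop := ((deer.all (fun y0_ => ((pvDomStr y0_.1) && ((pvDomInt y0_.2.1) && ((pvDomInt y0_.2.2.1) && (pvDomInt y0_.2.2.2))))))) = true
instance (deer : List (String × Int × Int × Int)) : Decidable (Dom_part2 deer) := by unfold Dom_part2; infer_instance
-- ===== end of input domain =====

-- B replaces A's per-second closed-form recompute of every distance by an incremental
-- per-second simulation (add speed while flying); measured faster by a constant factor.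

-- ===== PORT A =====
-- winner(deer, t): running (max_dist, max_deer) over deer; int(t/(fly+rest)) is exact
-- truncating division here (PySem.Int.truncdiv; |arguments| < 2^53 on Dom).
def winner (deer : List (String × Int × Int × Int)) (t : Int) : String × Int :=
  let st := deer.foldl (fun (st : Int × String) d =>
      let n := PySem.Int.truncdiv t (d.2.2.1 + d.2.2.2)
      let s := n * (d.2.2.1 + d.2.2.2)
      let e := min (t - s) d.2.2.1
      let dist := (n * d.2.2.1 + e) * d.2.1
      if dist > st.1 then (dist, d.1) else st) ((0 : Int), "")
  (st.2, st.1)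

def part2 (deer : List (String × Int × Int × Int)) : Int :=
  let score0 : PySem.Dict String Int :=
    deer.foldl (fun sc d => sc.insert d.1 0) PySem.Dict.empty
  -- score[winner(deer,t)[0]] += 1 (the key is present under Pre_part2)
  let score := (PySem.List.pyRange 1 2504 1).foldl
    (fun sc t => sc.modify (winner deer t).1 0 (· + 1)) score0
  score.keys.foldl (fun m k => max m (score.getD k 0)) 0

-- ===== PORT B =====
def part2_alt (deer : List (String × Int × Int × Int)) : Int :=
  let dist0 : List Int := List.replicate deer.length 0
  let score0 : PySem.Dict String Int :=
    deer.foldl (fun sc d => sc.insert d.1 0) PySem.Dict.empty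
  let fin := (PySem.List.pyRange 1 2504 1).foldl
    (fun (st : List Int × PySem.Dict String Int) t =>
      let dist := (deer.zip st.1).map (fun p =>
        p.2 + (if PySem.Int.mod (t - 1) (p.1.2.2.1 + p.1.2.2.2) < p.1.2.2.1 then p.1.2.1 else 0))
      let lb := (deer.zip dist).foldl
        (fun (lb : String × Int) p => if p.2 > lb.2 then (p.1.1, p.2) else lb) ("", 0)
      (dist, st.2.modify lb.1 0 (· + 1)))
    (dist0, score0)
  -- max(score.values()); values nonempty under Pre_part2, so .getD 0 is never exercised there
  (PySem.List.max? fin.2.values (fun y => y)).getD 0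

-- ===== PRECONDITION & SPEC =====
-- Pre_part2 keeps the task's natural domain: nonnegative fly and rest times with a
-- positive cycle for each reindeer, and at least one reindeer that flies with positive
-- speed (on this domain that is exactly the condition under which A's score[winner]
-- lookup never raises KeyError, since that reindeer leads second 1).  It excludes inputs
-- with a negative fly or rest time on some of which A still returns: there A's closed
-- form describes no flight schedule and its value is an artefact of the formula
-- (see the cited example), while B simulates the schedule literally.
def Pre_part2 (deer : List (String × Int × Int × Int)) : Prop :=
  (∀ d ∈ deer, 0 ≤ d.2.2.1 ∧ 0 ≤ d.2.2.2 ∧ 1 ≤ d.2.2.1 + d.2.2.2) ∧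
  ∃ d ∈ deer, 1 ≤ d.2.1 ∧ 1 ≤ d.2.2.1
instance (deer : List (String × Int × Int × Int)) : Decidable (Pre_part2 deer) := by
  unfold Pre_part2; infer_instance
def pvWitness_part2 : (List (String × Int × Int × Int)) := [("a", 1, 1, 0)]

def Spec_part2 (deer : List (String × Int × Int × Int)) (out : Int) : Prop := out = part2_alt deer
instance (deer : List (String × Int × Int × Int)) (out : Int) : Decidable (Spec_part2 deer out) := by unfold Spec_part2; infer_instance

-- ===== CLAIM (what is proved, stated in full; the proofs are below) =====
def Claim_equal_part2 : Prop := ∀ (deer : List (String × Int × Int × Int)), Dom_part2 deer → Pre_part2 deer → Spec_part2 deer (part2 deer)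

-- ===== LEMMAS AND PROOFS =====

-- the closed-form distance of deer d after t seconds (what A's winner computes per deer)
def distA (d : String × Int × Int × Int) (t : Int) : Int :=
  (t / (d.2.2.1 + d.2.2.2) * d.2.2.1 + min (t % (d.2.2.1 + d.2.2.2)) d.2.2.1) * d.2.1

def PreD (d : String × Int × Int × Int) : Prop := 0 ≤ d.2.2.1 ∧ 0 ≤ d.2.2.2 ∧ 1 ≤ d.2.2.1 + d.2.2.2

-- proof-side names for the two loop bodies and the common score initialisation
def initScore (deer : List (String × Int × Int × Int)) : PySem.Dict String Int :=
  deer.foldl (fun sc d => sc.insert d.1 0) PySem.Dict.empty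

def stepA (deer : List (String × Int × Int × Int)) (sc : PySem.Dict String Int) (t : Int) :
    PySem.Dict String Int :=
  sc.modify (winner deer t).1 0 (· + 1)

def stepB (deer : List (String × Int × Int × Int))
    (st : List Int × PySem.Dict String Int) (t : Int) : List Int × PySem.Dict String Int :=
  let dist := (deer.zip st.1).map (fun p =>
    p.2 + (if PySem.Int.mod (t - 1) (p.1.2.2.1 + p.1.2.2.2) < p.1.2.2.1 then p.1.2.1 else 0))
  let lb := (deer.zip dist).foldl
    (fun (lb : String × Int) p => if p.2 > lb.2 then (p.1.1, p.2) else lb) ("", 0)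
  (dist, st.2.modify lb.1 0 (· + 1))

theorem arith_step (c f sp t : Int) (hc : 1 ≤ c) (h2 : 0 ≤ f) (hfc : f ≤ c) :
    (t / c * f + min (t % c) f) * sp
      = ((t - 1) / c * f + min ((t - 1) % c) f) * sp + (if (t - 1) % c < f then sp else 0) := by
  have hcpos : 0 < c := by omega
  set q := (t - 1) / c with hq
  set r := (t - 1) % c with hr
  have hr0 : 0 ≤ r := Int.emod_nonneg _ (by omega)
  have hrc : r < c := Int.emod_lt_of_pos _ hcpos
  have heq : c * q + r = t - 1 := by rw [hq, hr]; exact Int.mul_ediv_add_emod _ _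
  by_cases hcase : r + 1 < c
  · have h4 : t / c = q ∧ t % c = r + 1 := (Int.ediv_emod_unique hcpos).mpr (by omega)
    rw [h4.1, h4.2]
    by_cases hrf : r < f
    · rw [if_pos hrf, min_eq_left (by omega), min_eq_left (by omega)]; ring
    · rw [if_neg hrf, min_eq_right (by omega), min_eq_right (by omega)]; ring
  · have hexp : c * (q + 1) = c * q + c := by ring
    have h4 : t / c = q + 1 ∧ t % c = 0 := (Int.ediv_emod_unique hcpos).mpr (by omega)
    rw [h4.1, h4.2]
    by_cases hrf : r < f
    · have hfcq : f = c := by omega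
      have hrr : r = c - 1 := by omega
      rw [if_pos hrf, min_eq_left (by omega), min_eq_left (by omega), hrr, hfcq]; ring
    · rw [if_neg hrf, min_eq_left (by omega), min_eq_right (by omega)]; ring

theorem distA_succ (d : String × Int × Int × Int) (hd : PreD d) (t : Int) :
    distA d t = distA d (t - 1) +
      (if PySem.Int.mod (t - 1) (d.2.2.1 + d.2.2.2) < d.2.2.1 then d.2.1 else 0) := by
  obtain ⟨h1, h2, h3⟩ := hd
  rw [PySem.Int.mod_eq_emod_of_pos (by omega)]
  exact arith_step _ _ _ _ (by omega) h1 (by omega)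

theorem distA_zero (d : String × Int × Int × Int) (hd : PreD d) : distA d 0 = 0 := by
  obtain ⟨h1, h2, h3⟩ := hd
  simp [distA, min_eq_left (show (0:Int) ≤ d.2.2.1 by omega)]

-- A's inline winner arithmetic equals distA for t ≥ 0 (truncating = floor division there)
theorem inline_eq_distA (d : String × Int × Int × Int) (t : Int) (ht : 0 ≤ t) :
    (PySem.Int.truncdiv t (d.2.2.1 + d.2.2.2) * d.2.2.1 +
      min (t - PySem.Int.truncdiv t (d.2.2.1 + d.2.2.2) * (d.2.2.1 + d.2.2.2)) d.2.2.1) * d.2.1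
      = distA d t := by
  have h : PySem.Int.truncdiv t (d.2.2.1 + d.2.2.2) = t / (d.2.2.1 + d.2.2.2) := by
    simp [PySem.Int.truncdiv, Int.tdiv_eq_ediv, Or.inl ht]
  have h2 : t - t / (d.2.2.1 + d.2.2.2) * (d.2.2.1 + d.2.2.2) = t % (d.2.2.1 + d.2.2.2) := by
    rw [Int.emod_def]; ring
  rw [h, h2, distA]

theorem zip_map_self {α β : Type} (g : α → β) (l : List α) :
    l.zip (l.map g) = l.map (fun x => (x, g x)) := by
  induction l with
  | nil => rfl
  | cons d l ih => simp [ih]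

-- A's running (max_dist, max_deer) scan is B's running (leader, best) scan, swapped
theorem swap_fold (f : (String × Int × Int × Int) → Int) :
    ∀ (l : List (String × Int × Int × Int)) (md : Int) (mn : String),
    l.foldl (fun st d => if f d > st.1 then (f d, d.1) else st) (md, mn)
      = Prod.swap ((l.zip (l.map f)).foldl
          (fun (lb : String × Int) p => if p.2 > lb.2 then (p.1.1, p.2) else lb) (mn, md)) := by
  intro l
  induction l with
  | nil => intro md mn; rfl
  | cons d l ih =>
    intro md mn
    simp only [List.map_cons, List.zip_cons_cons, List.foldl_cons]
    by_cases h : f d > md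
    · simp only [h, if_pos, gt_iff_lt, ih]
    · simp only [gt_iff_lt] at h ⊢
      rw [if_neg h, if_neg h, ih]

theorem stepB_eq (deer : List (String × Int × Int × Int))
    (hpre : ∀ d ∈ deer, PreD d) (t : Int) (ht : 1 ≤ t) (sc : PySem.Dict String Int) :
    stepB deer (deer.map (fun d => distA d (t - 1)), sc) t
      = (deer.map (fun d => distA d t), stepA deer sc t) := by
  have hdist : (deer.zip (deer.map (fun d => distA d (t - 1)))).map (fun p =>
      p.2 + (if PySem.Int.mod (t - 1) (p.1.2.2.1 + p.1.2.2.2) < p.1.2.2.1 then p.1.2.1 else 0))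
      = deer.map (fun d => distA d t) := by
    rw [zip_map_self, List.map_map]
    refine List.map_congr_left (fun d hd => ?_)
    exact (distA_succ d (hpre d hd) t).symm
  have hwin : (winner deer t).1 = ((deer.zip (deer.map (fun d => distA d t))).foldl
      (fun (lb : String × Int) p => if p.2 > lb.2 then (p.1.1, p.2) else lb) ("", 0)).1 := by
    have hcongr : deer.foldl (fun (st : Int × String) d =>
        let n := PySem.Int.truncdiv t (d.2.2.1 + d.2.2.2)
        let s := n * (d.2.2.1 + d.2.2.2)
        let e := min (t - s) d.2.2.1
        let dist := (n * d.2.2.1 + e) * d.2.1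
        if dist > st.1 then (dist, d.1) else st) ((0 : Int), "")
        = deer.foldl (fun (st : Int × String) d =>
            if distA d t > st.1 then (distA d t, d.1) else st) ((0 : Int), "") := by
      apply PySem.List.foldl_congr_mem
      intro acc d hd
      dsimp only
      rw [inline_eq_distA d t (by omega)]
    rw [winner, hcongr, swap_fold (fun d => distA d t) deer 0 ""]
    simp [Prod.swap]
  rw [stepB]
  dsimp only
  rw [hdist, stepA, hwin]

-- the main loop: B's score component tracks A's score fold, B's distances stay closed-form
theorem loop_snd (deer : List (String × Int × Int × Int)) (hpre : ∀ d ∈ deer, PreD d) :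
    ∀ (k : Nat) (a : Int), 1 ≤ a → ∀ sc : PySem.Dict String Int,
    ((PySem.List.pyRange a (a + (k : Int)) 1).foldl (stepB deer)
        (deer.map (fun d => distA d (a - 1)), sc)).2
      = (PySem.List.pyRange a (a + (k : Int)) 1).foldl (stepA deer) sc := by
  intro k
  induction k with
  | zero =>
    intro a ha sc
    rw [show a + ((0 : Nat) : Int) = a by push_cast; ring,
      PySem.List.pyRange_one_eq_nil (le_refl a)]
    rfl
  | succ k ih =>
    intro a ha sc
    have hsplit : a + ((k + 1 : Nat) : Int) = (a + 1) + (k : Int) := by push_cast; ring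
    rw [hsplit, PySem.List.pyRange_one_cons (by omega), List.foldl_cons, List.foldl_cons,
      stepB_eq deer hpre a ha sc]
    have := ih (a + 1) (by omega) (stepA deer sc a)
    rw [show a + 1 - 1 = a by ring] at this
    exact this

-- score-dict invariant: unique keys, nonnegative values, nonempty
def InvSc (sc : PySem.Dict String Int) : Prop :=
  sc.keys.Nodup ∧ (∀ v ∈ sc.values, 0 ≤ v) ∧ sc.items ≠ []

theorem insert_items_ne {sc : PySem.Dict String Int} (h : sc.items ≠ []) (k : String) (v : Int) :
    (sc.insert k v).items ≠ [] := by
  rw [PySem.Dict.items_insert]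
  split <;> simp [h]

theorem getD_nonneg {sc : PySem.Dict String Int} (h : ∀ v ∈ sc.values, 0 ≤ v) (k : String) :
    0 ≤ sc.getD k 0 := by
  rw [PySem.Dict.getD_eq_get?_getD]
  cases hg : sc.get? k with
  | none => simp
  | some v =>
    have hmem : (k, v) ∈ sc.items := PySem.Dict.mem_items_of_get?_eq_some _ hg
    exact h v (List.mem_map.mpr ⟨(k, v), hmem, rfl⟩)

theorem inv_modify {sc : PySem.Dict String Int} (h : InvSc sc) (k : String) :
    InvSc (sc.modify k 0 (· + 1)) := by
  obtain ⟨hnd, hv, hne⟩ := h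
  refine ⟨?_, ?_, ?_⟩
  · exact PySem.Dict.nodup_keys_insert _ _ _ hnd
  · intro v hvm
    rcases PySem.Dict.mem_values_insert _ _ _ _ hvm with h1 | h1
    · have hg := getD_nonneg hv k
      have h1' : v = sc.getD k 0 + 1 := h1
      omega
    · exact hv v h1
  · exact insert_items_ne hne _ _

theorem inv_fold (deer : List (String × Int × Int × Int)) :
    ∀ (l : List Int) (sc : PySem.Dict String Int), InvSc sc →
    InvSc (l.foldl (stepA deer) sc) := by
  intro l
  induction l with
  | nil => intro sc h; exact h
  | cons t l ih => intro sc h; exact ih _ (inv_modify h _)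

theorem values_init_nonneg (deer : List (String × Int × Int × Int)) :
    ∀ (sc : PySem.Dict String Int), (∀ v ∈ sc.values, 0 ≤ v) →
    ∀ v ∈ (deer.foldl (fun sc d => sc.insert d.1 (0 : Int)) sc).values, 0 ≤ v := by
  induction deer with
  | nil => intro sc h; exact h
  | cons d l ih =>
    intro sc h
    refine ih _ (fun v hv => ?_)
    rcases PySem.Dict.mem_values_insert _ _ _ _ hv with h1 | h1
    · omega
    · exact h v h1

theorem items_init_ne (deer : List (String × Int × Int × Int)) :
    ∀ (sc : PySem.Dict String Int), sc.items ≠ [] →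
    (deer.foldl (fun sc d => sc.insert d.1 (0 : Int)) sc).items ≠ [] := by
  induction deer with
  | nil => intro sc h; exact h
  | cons d l ih => intro sc h; exact ih _ (insert_items_ne h _ _)

theorem inv_init (deer : List (String × Int × Int × Int)) (h : deer ≠ []) :
    InvSc (initScore deer) := by
  refine ⟨?_, ?_, ?_⟩
  · exact PySem.Dict.nodup_keys_foldl_insert_key deer (fun d => d.1) (fun _ _ => 0) _
      PySem.Dict.nodup_keys_empty
  · exact values_init_nonneg deer PySem.Dict.empty (fun v hv => by cases hv)
  · cases deer with
    | nil => exact absurd rfl h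
    | cons d l =>
      refine items_init_ne l _ ?_
      rw [PySem.Dict.items_insert]
      simp [PySem.Dict.contains_empty]

-- final extraction: A's running max over keys = max(values) when the dict is InvSc
theorem final_max (sc : PySem.Dict String Int) (h : InvSc sc) :
    sc.keys.foldl (fun m k => max m (sc.getD k 0)) 0
      = (PySem.List.max? sc.values (fun y => y)).getD 0 := by
  obtain ⟨hnd, hv, hne⟩ := h
  have hkeys : sc.keys.foldl (fun m k => max m (sc.getD k 0)) 0
      = sc.items.foldl (fun m p => max m (sc.getD p.1 0)) 0 := by
    simp only [PySem.Dict.keys, List.foldl_map]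
  have hcongr : sc.items.foldl (fun m p => max m (sc.getD p.1 0)) 0
      = sc.items.foldl (fun m p => max m p.2) 0 := by
    apply PySem.List.foldl_congr_mem
    intro m p hp
    rw [PySem.Dict.getD_of_mem_items _ (k := p.1) (v := p.2) (by simpa using hp) hnd 0]
  have hvals : sc.items.foldl (fun m p => max m p.2) 0
      = sc.values.foldl (fun m v => max m v) 0 := by
    simp only [PySem.Dict.values, List.foldl_map]
  rw [hkeys, hcongr, hvals]
  have hvne : sc.values ≠ [] := by
    simp only [PySem.Dict.values]
    simpa using hne
  cases hval : sc.values with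
  | nil => exact absurd hval hvne
  | cons v vs =>
    rw [PySem.List.max?_id_cons, Option.getD_some, List.foldl_cons]
    have hv0 : 0 ≤ v := hv v (by rw [hval]; exact List.mem_cons_self)
    rw [max_eq_right hv0]

-- ===== VERDICT (by name: the statement is the Claim_ definition above) =====
theorem part2_spec : Claim_equal_part2 := by
  intro deer _ hpre
  obtain ⟨hd, dpos, hdpos, _⟩ := hpre
  have hne : deer ≠ [] := List.ne_nil_of_mem hdpos
  have hpreD : ∀ d ∈ deer, PreD d := fun d hdm => hd d hdm
  show part2 deer = part2_alt deer
  have hA : part2 deer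
      = ((PySem.List.pyRange 1 2504 1).foldl (stepA deer) (initScore deer)).keys.foldl
          (fun m k => max m (((PySem.List.pyRange 1 2504 1).foldl (stepA deer)
            (initScore deer)).getD k 0)) 0 := rfl
  have hB : part2_alt deer
      = (PySem.List.max? ((PySem.List.pyRange 1 2504 1).foldl (stepB deer)
          (List.replicate deer.length 0, initScore deer)).2.values (fun y => y)).getD 0 := rfl
  have hinit : deer.map (fun d => distA d ((1 : Int) - 1))
      = List.replicate deer.length (0 : Int) := by
    rw [show (1 : Int) - 1 = 0 by ring]
    rw [List.map_congr_left (fun d hdm => distA_zero d (hpreD d hdm))]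
    exact List.map_const'
  have hloop := loop_snd deer hpreD 2503 1 (by norm_num) (initScore deer)
  rw [show (1 : Int) + ((2503 : Nat) : Int) = 2504 by norm_num, hinit] at hloop
  have hinv : InvSc ((PySem.List.pyRange 1 2504 1).foldl (stepA deer) (initScore deer)) :=
    inv_fold deer _ _ (inv_init deer hne)
  rw [hA, hB, hloop, final_max _ hinv]
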